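-- pv_equiv track=rewrite | github.com/Muawiya-contact/leetcode-solutions-by-codingmoves | Eassy/3289. The Two Sneaky Numbers of Digitville/Slotion.py | getSneakyNumbers
-- ===== SOURCE A (Python) =====
-- def getSneakyNumbers(nums):
--     """
--     :type nums: List[int]
--     :rtype: List[int]
--     """
--     from collections import Counter
--     c = Counter(nums)
--     r = []
--     k = list(c.keys())
--     for x in k:
--         if c[x] == 2 :
--             r.append(x)
--
--     return r
-- ===== SOURCE B (Python) =====
-- def getSneakyNumbers(nums):
--     res = []
--     seen = set()
--     rest = nums
--     while rest:
--         x, rest = rest[0], rest[1:]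
--         if x not in seen:
--             seen.add(x)
--             if rest.count(x) == 1:
--                 res.append(x)
--     return res
-- ===== Notes on version B (the rewrite author's own statement) =====
-- stated objective: alternative
-- what changed: Replaces A's two-stage Counter-table-then-key-loop by a single streaming scan over the shrinking suffix with a seen-set, emitting each value at its first occurrence when exactly one more copy remains in the suffix.
import Mathlib
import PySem

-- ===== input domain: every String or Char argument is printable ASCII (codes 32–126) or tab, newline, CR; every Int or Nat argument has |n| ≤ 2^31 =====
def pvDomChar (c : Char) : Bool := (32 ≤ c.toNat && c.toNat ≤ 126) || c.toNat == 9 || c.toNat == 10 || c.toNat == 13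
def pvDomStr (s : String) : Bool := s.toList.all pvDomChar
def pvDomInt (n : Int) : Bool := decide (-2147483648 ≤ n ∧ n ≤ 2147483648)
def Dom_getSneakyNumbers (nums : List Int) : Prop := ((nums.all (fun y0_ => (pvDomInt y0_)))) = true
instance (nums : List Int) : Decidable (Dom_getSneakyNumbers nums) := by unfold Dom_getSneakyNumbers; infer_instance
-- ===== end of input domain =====

-- B replaces A's Counter table + key loop by one streaming scan over the shrinking
-- suffix with a seen-set, emitting a value at its first occurrence when exactly one
-- more copy remains — an alternative decomposition, same return value.

-- ===== PORT A =====
def getSneakyNumbers (nums : List Int) : List Int :=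
  let c := PySem.Dict.counter nums
  (c.keys).foldl (fun r x => if c.getD x 0 == 2 then r ++ [x] else r) []

-- ===== PORT B =====
-- the 'while rest:' loop of Source B, state (rest, seen, res)
def goSneakyAlt (rest : List Int) (seen : PySem.Set Int) (res : List Int) : List Int :=
  match rest with
  | [] => res
  | x :: tail =>
      if PySem.Set.contains seen x then goSneakyAlt tail seen res
      else if PySem.List.count tail x == 1 then
        goSneakyAlt tail (PySem.Set.add seen x) (res ++ [x])
      else goSneakyAlt tail (PySem.Set.add seen x) res

def getSneakyNumbers_alt (nums : List Int) : List Int :=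
  goSneakyAlt nums PySem.Set.empty []

-- ===== PRECONDITION & SPEC =====
def Spec_getSneakyNumbers (nums : List Int) (out : List Int) : Prop := out = getSneakyNumbers_alt nums
instance (nums : List Int) (out : List Int) : Decidable (Spec_getSneakyNumbers nums out) := by unfold Spec_getSneakyNumbers; infer_instance

-- ===== CLAIM =====
def Claim_equal_getSneakyNumbers : Prop := ∀ (nums : List Int), Dom_getSneakyNumbers nums → Spec_getSneakyNumbers nums (getSneakyNumbers nums)

-- ===== LEMMAS AND PROOFS =====

-- set-insertion foldl as "append the unseen distinct elements"
lemma foldl_add_eq (xs : List Int) : ∀ (s : List Int),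
    xs.foldl PySem.Set.add s = s ++ (PySem.Set.ofList xs).filter (fun y => !(PySem.Set.contains s y)) := by
  induction xs with
  | nil => intro s; simp [PySem.Set.ofList]
  | cons x xs ih =>
    intro s
    have h1 : PySem.Set.ofList (x :: xs) = xs.foldl PySem.Set.add [x] := by
      rw [PySem.Set.ofList_eq_foldl]
      simp [List.foldl_cons, PySem.Set.add, PySem.Set.contains]
    rw [List.foldl_cons, ih, h1, ih]
    by_cases hx : x ∈ s
    · have hadd : PySem.Set.add s x = s := by
        simp [PySem.Set.add, PySem.Set.contains, hx]
      rw [hadd]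
      simp only [List.filter_append, List.filter_filter, List.append_assoc]
      congr 1
      have hx1 : List.filter (fun y => !PySem.Set.contains s y) [x] = [] := by
        simp [PySem.Set.contains, hx]
      rw [hx1, List.nil_append]
      apply List.filter_congr
      intro y _
      simp only [PySem.Set.contains, List.contains_eq_mem, List.mem_cons,
        List.not_mem_nil, or_false, Bool.not_eq_eq_eq_not]
      by_cases hy : y ∈ s
      · simp [hy]
      · have : y ≠ x := fun h => hy (h ▸ hx)
        simp [hy, this]
    · have hadd : PySem.Set.add s x = s ++ [x] := by
        simp [PySem.Set.add, PySem.Set.contains, hx]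
      rw [hadd]
      simp only [List.filter_append, List.filter_filter, List.append_assoc]
      congr 1
      have hx1 : List.filter (fun y => !PySem.Set.contains s y) [x] = [x] := by
        simp [PySem.Set.contains, hx]
      rw [hx1]
      congr 1
      apply List.filter_congr
      intro y _
      simp only [PySem.Set.contains, List.contains_eq_mem, List.mem_append,
        List.mem_cons, List.not_mem_nil, or_false]
      by_cases hy : y ∈ s <;> by_cases hyx : y = x <;> simp [hy, hyx]

lemma ofList_cons (x : Int) (xs : List Int) :
    PySem.Set.ofList (x :: xs) = x :: (PySem.Set.ofList xs).filter (fun y => y ≠ x) := by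
  have h1 : PySem.Set.ofList (x :: xs) = xs.foldl PySem.Set.add [x] := by
    rw [PySem.Set.ofList_eq_foldl]
    simp [List.foldl_cons, PySem.Set.add, PySem.Set.contains]
  rw [h1, foldl_add_eq]
  simp only [List.singleton_append, List.cons.injEq, true_and]
  apply List.filter_congr
  intro y _
  simp [PySem.Set.contains]

-- loop invariant for B's scan
lemma goSneakyAlt_eq (rest : List Int) : ∀ (seen res : List Int),
    goSneakyAlt rest seen res =
      res ++ (PySem.Set.ofList rest).filter
        (fun y => !(PySem.Set.contains seen y) && (PySem.List.count rest y == 2)) := by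
  induction rest with
  | nil => intro seen res; simp [goSneakyAlt, PySem.Set.ofList]
  | cons x tail ih =>
    intro seen res
    rw [ofList_cons, List.filter_cons]
    by_cases hs : x ∈ seen
    · have hs' : PySem.Set.contains seen x = true := by
        simp [PySem.Set.contains, hs]
      simp only [goSneakyAlt, hs', if_true, hs', Bool.not_true, Bool.false_and, if_false]
      rw [ih, List.filter_filter]
      congr 1
      apply List.filter_congr
      intro y _
      simp only [PySem.Set.contains, PySem.List.count_eq, List.count_cons,
        List.contains_eq_mem]
      by_cases hy : y ∈ seen
      · simp [hy]
      · have hyx : y ≠ x := fun h => hy (h ▸ hs)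
        simp [hy, hyx, Ne.symm hyx]
    · have hs' : PySem.Set.contains seen x = false := by
        simp [PySem.Set.contains, hs]
      have hadd : PySem.Set.add seen x = seen ++ [x] := by
        simp [PySem.Set.add, PySem.Set.contains, hs]
      have hcnt : (PySem.List.count (x :: tail) x == 2) = (PySem.List.count tail x == 1) := by
        simp [PySem.List.count_eq]
      have hfilter : ∀ res', goSneakyAlt tail (PySem.Set.add seen x) res' =
          res' ++ (PySem.Set.ofList tail).filter
            (fun y => (y ≠ x) && (!(PySem.Set.contains seen y) && (PySem.List.count (x :: tail) y == 2))) := by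
        intro res'
        rw [ih, hadd]
        congr 1
        apply List.filter_congr
        intro y _
        simp only [PySem.Set.contains, PySem.List.count_eq, List.count_cons,
          List.contains_eq_mem, List.mem_append, List.mem_cons, List.not_mem_nil, or_false]
        by_cases hy : y ∈ seen
        · simp [hy]
        · by_cases hyx : y = x
          · simp [hy, hyx]
          · simp [hy, hyx, Ne.symm hyx]
      by_cases hc : PySem.List.count tail x == 1
      · simp only [goSneakyAlt, hs', Bool.false_eq_true, if_false, hc, if_true,
          hs', Bool.not_false, Bool.true_and, hcnt]
        rw [hfilter, List.filter_filter, List.append_assoc, List.singleton_append]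
        congr 3
        funext y
        simp [Bool.and_comm]
      · simp only [Bool.not_eq_true] at hc
        simp only [goSneakyAlt, hs', Bool.false_eq_true, if_false, hc, if_false,
          hs', Bool.not_false, Bool.true_and, hcnt]
        rw [hfilter, List.filter_filter]
        congr 2
        funext y
        simp [Bool.and_comm]

-- ===== VERDICT =====
theorem getSneakyNumbers_spec : Claim_equal_getSneakyNumbers := by
  intro nums _
  show getSneakyNumbers nums = getSneakyNumbers_alt nums
  simp only [getSneakyNumbers, getSneakyNumbers_alt, PySem.Dict.keys_counter]
  rw [PySem.List.foldl_append_if_eq_filter, goSneakyAlt_eq]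
  simp only [List.nil_append]
  apply List.filter_congr
  intro x _
  simp [PySem.Dict.getD_counter, PySem.Set.contains, PySem.Set.empty, PySem.List.count_eq]
  omega
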